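-- pv_equiv track=rewrite | github.com/MrBrantCode/unitest_baseline | mut_generate/mist_train_cf/cf_15466/solution.py | count_unique_vowels
-- ===== SOURCE A (Python) =====
-- def count_unique_vowels(sentence):
--     vowels = set('aeiou')
--     unique_vowels = set()
--     prev_consonant = False
--
--     for i in range(1, len(sentence)-1):
--         if sentence[i] in vowels:
--             if prev_consonant and sentence[i+1] not in vowels and (i + 1 == len(sentence) - 1 or sentence[i+2] not in vowels):
--                 unique_vowels.add(sentence[i])
--             prev_consonant = False
--         elif sentence[i].isalpha() and sentence[i] not in vowels:
--             if i + 1 < len(sentence) and sentence[i+1] in vowels: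
--                 prev_consonant = True
--
--     return len(unique_vowels)
-- ===== SOURCE B (Python) =====
-- def count_unique_vowels(sentence):
--     n = len(sentence)
--     vowels = 'aeiou'
--
--     def qualifies(i):
--         return (sentence[i - 1].isalpha() and sentence[i - 1] not in vowels
--                 and sentence[i + 1] not in vowels
--                 and (i + 1 == n - 1 or sentence[i + 2] not in vowels))
--
--     return sum(1 for v in vowels
--                if any(sentence[i] == v and qualifies(i) for i in range(2, n - 1)))
-- ===== Notes on version B (the rewrite author's own statement) =====
-- stated objective: alternative
-- what changed: Replaces A's single stateful scan that builds a set with a prev_consonant flag by per-letter existence tests: for each of the five vowels, an any() scan asks whether some position qualifies, and the answers are summed; no set and no carried flag remain.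
import Mathlib
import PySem

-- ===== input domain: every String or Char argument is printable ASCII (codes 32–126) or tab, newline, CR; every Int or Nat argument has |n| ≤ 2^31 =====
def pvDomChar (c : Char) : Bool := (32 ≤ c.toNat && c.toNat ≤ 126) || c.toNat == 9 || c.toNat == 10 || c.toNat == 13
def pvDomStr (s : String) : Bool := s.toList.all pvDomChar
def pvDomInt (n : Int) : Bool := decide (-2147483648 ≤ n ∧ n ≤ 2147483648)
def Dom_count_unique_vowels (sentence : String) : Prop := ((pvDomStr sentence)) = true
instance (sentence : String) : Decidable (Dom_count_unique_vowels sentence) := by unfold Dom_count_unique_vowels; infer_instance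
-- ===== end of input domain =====

-- B replaces A's stateful set-building scan by five per-vowel existence scans summed up (alternative decomposition, same cost).


-- ===== PORT A =====
-- vowels = set('aeiou')
def pvVowels : PySem.Set Char := PySem.Set.ofList "aeiou".toList

-- the body of A's for-loop, as a fold step over the state (unique_vowels, prev_consonant)
def pvStepA (cs : List Char) (n : Int) (st : PySem.Set Char × Bool) (i : Int) : PySem.Set Char × Bool :=
  let c := PySem.List.pyGetD cs i ' '
  if PySem.Set.contains pvVowels c then
    (if st.2 && !(PySem.Set.contains pvVowels (PySem.List.pyGetD cs (i + 1) ' '))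
        && (i + 1 == n - 1 || !(PySem.Set.contains pvVowels (PySem.List.pyGetD cs (i + 2) ' '))) then
       PySem.Set.add st.1 c
     else st.1, false)
  else if PySem.Chars.isalpha c && !(PySem.Set.contains pvVowels c) then
    (st.1, if decide (i + 1 < n) && PySem.Set.contains pvVowels (PySem.List.pyGetD cs (i + 1) ' ') then true else st.2)
  else st

def count_unique_vowels (sentence : String) : Int :=
  let cs := sentence.toList
  let n : Int := PySem.List.len cs
  let r := (PySem.List.pyRange 1 (n - 1) 1).foldl (pvStepA cs n) (PySem.Set.empty, false)
  PySem.Set.len r.1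

-- ===== PORT B =====
-- vowels = 'aeiou' (a string in B)
def pvVowelsStr : List Char := "aeiou".toList

-- B's helper qualifies(i)
def pvQualifies (cs : List Char) (n i : Int) : Bool :=
  PySem.Chars.isalpha (PySem.List.pyGetD cs (i - 1) ' ')
  && !(pvVowelsStr.contains (PySem.List.pyGetD cs (i - 1) ' '))
  && !(pvVowelsStr.contains (PySem.List.pyGetD cs (i + 1) ' '))
  && (i + 1 == n - 1 || !(pvVowelsStr.contains (PySem.List.pyGetD cs (i + 2) ' ')))

-- sum(1 for v in vowels if any(sentence[i] == v and qualifies(i) for i in range(2, n-1)))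
def count_unique_vowels_alt (sentence : String) : Int :=
  let cs := sentence.toList
  let n : Int := PySem.List.len cs
  (pvVowelsStr.map (fun v =>
     if (PySem.List.pyRange 2 (n - 1) 1).any
          (fun i => (PySem.List.pyGetD cs i ' ' == v) && pvQualifies cs n i)
     then (1 : Int) else 0)).sum

-- ===== PRECONDITION & SPEC =====
def Spec_count_unique_vowels (sentence : String) (out : Int) : Prop := out = count_unique_vowels_alt sentence
instance (sentence : String) (out : Int) : Decidable (Spec_count_unique_vowels sentence out) := by unfold Spec_count_unique_vowels; infer_instance

-- ===== CLAIM (what is proved, stated in full; the proofs are below) =====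
def Claim_equal_count_unique_vowels : Prop := ∀ (sentence : String), Dom_count_unique_vowels sentence → Spec_count_unique_vowels sentence (count_unique_vowels sentence)

-- ===== LEMMAS AND PROOFS =====

-- set(l + [x]) adds x to set(l)
lemma pvOfList_append_singleton (l : List Char) (x : Char) :
    PySem.Set.ofList (l ++ [x]) = PySem.Set.add (PySem.Set.ofList l) x := by
  simp [PySem.Set.ofList_eq_foldl, List.foldl_append]

-- the per-position condition characterising A's additions (proof-side only)
def pvPick (cs : List Char) (n : Int) (i : Int) : Bool :=
  PySem.Set.contains pvVowels (PySem.List.pyGetD cs i ' ') && pvQualifies cs n i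

-- A's set accumulated up to bound m, as the dedup of the picked characters
def pvBSet (cs : List Char) (n m : Int) : PySem.Set Char :=
  PySem.Set.ofList (((PySem.List.pyRange 2 m 1).filter (pvPick cs n)).map (fun i => PySem.List.pyGetD cs i ' '))

-- A's prev_consonant after processing range(1, m)
def pvPrev (cs : List Char) (m : Int) : Bool :=
  decide (2 ≤ m)
  && (PySem.Chars.isalpha (PySem.List.pyGetD cs (m - 1) ' ')
      && !(PySem.Set.contains pvVowels (PySem.List.pyGetD cs (m - 1) ' ')))
  && PySem.Set.contains pvVowels (PySem.List.pyGetD cs m ' ')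

-- one fold step of A, from the invariant at k to the invariant at k+1
lemma pvStep (cs : List Char) (k : Int) (h1 : 1 ≤ k) (hk : k + 1 ≤ PySem.List.len cs - 1) :
    pvStepA cs (PySem.List.len cs) (pvBSet cs (PySem.List.len cs) k, pvPrev cs k) k
      = (pvBSet cs (PySem.List.len cs) (k + 1), pvPrev cs (k + 1)) := by
  simp only [PySem.List.len_eq] at hk ⊢
  have hB : pvBSet cs (cs.length : Int) (k + 1)
      = if pvPick cs (cs.length : Int) k && decide (2 ≤ k) then
          PySem.Set.add (pvBSet cs (cs.length : Int) k) (PySem.List.pyGetD cs k ' ')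
        else pvBSet cs (cs.length : Int) k := by
    by_cases h2 : (2 : Int) ≤ k
    · unfold pvBSet
      rw [PySem.List.pyRange_one_succ_right (by omega), List.filter_append, List.map_append]
      cases hp : pvPick cs (cs.length : Int) k
      · simp [hp, h2]
      · simp [hp, h2, pvOfList_append_singleton]
    · have hk1 : k = 1 := by omega
      subst hk1
      simp [pvBSet, PySem.List.pyRange_one_eq_nil, h2]
  rw [hB]
  unfold pvStepA pvPrev pvPick pvQualifies
  simp only [add_sub_cancel_right]
  have h2k : (2:Int) ≤ k + 1 := by omega
  have hlt : k + 1 < (cs.length : Int) := by omega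
  have hmem : ∀ c : Char, pvVowelsStr.contains c = PySem.Set.contains pvVowels c := by
    intro c; rfl
  simp only [hmem]
  by_cases hv : PySem.List.pyGetD cs k ' ' ∈ pvVowels
  · by_cases ha : PySem.Chars.isalpha (PySem.List.pyGetD cs (k - 1) ' ') = true <;>
      by_cases hv1 : PySem.List.pyGetD cs (k - 1) ' ' ∈ pvVowels <;>
      by_cases hv2 : PySem.List.pyGetD cs (k + 1) ' ' ∈ pvVowels <;>
      by_cases h2 : (2:Int) ≤ k <;>
      simp [hv, ha, hv1, hv2, h2, h2k, PySem.Set.contains]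
  · by_cases ha : PySem.Chars.isalpha (PySem.List.pyGetD cs k ' ') = true
    · by_cases hv1 : PySem.List.pyGetD cs (k + 1) ' ' ∈ pvVowels <;>
        simp [hv, ha, hv1, h2k, hlt, PySem.Set.contains]
    · simp [hv, ha, PySem.Set.contains]

-- loop invariant: A's fold over range(1, k) equals (the dedup of picks over range(2, k), the prev flag)
lemma pvInv (cs : List Char) : ∀ k : Nat, (k : Int) ≤ PySem.List.len cs - 1 →
    (PySem.List.pyRange 1 (k : Int) 1).foldl (pvStepA cs (PySem.List.len cs)) (PySem.Set.empty, false)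
      = (pvBSet cs (PySem.List.len cs) k, pvPrev cs k) := by
  intro k
  induction k with
  | zero =>
      intro _
      simp [PySem.List.pyRange_one_eq_nil, pvBSet, pvPrev, PySem.Set.ofList]
  | succ k ih =>
      intro hk
      have hcast : ((k + 1 : Nat) : Int) = (k : Int) + 1 := by push_cast; ring
      rcases Nat.eq_zero_or_pos k with h0 | h1
      · subst h0
        simp only [hcast]
        norm_num
        simp [PySem.List.pyRange_one_eq_nil, pvBSet, pvPrev, PySem.Set.ofList]
      · have h1' : (1 : Int) ≤ (k : Int) := by exact_mod_cast h1
        have hlen : (k : Int) + 1 ≤ PySem.List.len cs - 1 := by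
          rw [← hcast]; exact hk
        rw [hcast, PySem.List.pyRange_one_succ_right (by omega), List.foldl_append,
          ih (by omega)]
        simp only [List.foldl_cons, List.foldl_nil]
        exact pvStep cs k h1' hlen

-- two nodup lists with the same members have the same length
lemma pvNodupLenEq (l₁ l₂ : List Char) (h₁ : l₁.Nodup) (h₂ : l₂.Nodup)
    (hmem : ∀ x, x ∈ l₁ ↔ x ∈ l₂) : l₁.length = l₂.length := by
  rw [← List.toFinset_card_of_nodup h₁, ← List.toFinset_card_of_nodup h₂]
  congr 1
  ext x
  simp [hmem x]

-- the size of set(L) for L ⊆ "aeiou" is the number of vowels occurring in L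
lemma pvCard (L : List Char) (hsub : ∀ x ∈ L, x ∈ pvVowelsStr) :
    (PySem.Set.ofList L).length = (pvVowelsStr.filter (fun v => decide (v ∈ L))).length := by
  have hd : PySem.Set.ofList L = PySem.List.dedup L := by simp
  rw [hd]
  apply pvNodupLenEq
  · exact PySem.List.nodup_dedup L
  · exact List.Nodup.filter _ (by decide)
  · intro x
    rw [PySem.List.mem_dedup, List.mem_filter]
    constructor
    · intro hx; exact ⟨hsub x hx, by simpa using hx⟩
    · intro hx; simpa using hx.2

-- for a vowel v, B's any-scan answers exactly "v occurs among A's picked characters"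
lemma pvAnyIffMem (cs : List Char) (v : Char) (hv : v ∈ pvVowelsStr) :
    ((PySem.List.pyRange 2 (PySem.List.len cs - 1) 1).any
        (fun i => (PySem.List.pyGetD cs i ' ' == v) && pvQualifies cs (PySem.List.len cs) i))
      = decide (v ∈ ((PySem.List.pyRange 2 (PySem.List.len cs - 1) 1).filter
            (pvPick cs (PySem.List.len cs))).map (fun i => PySem.List.pyGetD cs i ' ')) := by
  have hvS : PySem.Set.contains pvVowels v = true := by
    have h : pvVowelsStr.contains v = true := by
      simp only [List.contains_iff_mem]; exact_mod_cast hv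
    exact h
  by_cases h : v ∈ ((PySem.List.pyRange 2 (PySem.List.len cs - 1) 1).filter
      (pvPick cs (PySem.List.len cs))).map (fun i => PySem.List.pyGetD cs i ' ')
  · rw [decide_eq_true h, List.any_eq_true]
    rcases List.mem_map.mp h with ⟨i, hi, hgi⟩
    rcases List.mem_filter.mp hi with ⟨hir, hip⟩
    refine ⟨i, hir, ?_⟩
    unfold pvPick at hip
    simp only [Bool.and_eq_true] at hip ⊢
    exact ⟨by simp [hgi], hip.2⟩
  · rw [decide_eq_false h]
    apply List.any_eq_false.mpr
    intro i hir
    by_contra hc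
    simp only [Bool.and_eq_true, beq_iff_eq] at hc
    apply h
    apply List.mem_map.mpr
    refine ⟨i, List.mem_filter.mpr ⟨hir, ?_⟩, hc.1⟩
    unfold pvPick
    simp only [Bool.and_eq_true]
    exact ⟨by rw [hc.1]; exact hvS, hc.2⟩

-- ===== VERDICT (by name: the statement is the Claim_ definition above) =====
theorem count_unique_vowels_spec : Claim_equal_count_unique_vowels := by
  intro sentence _
  unfold Spec_count_unique_vowels count_unique_vowels count_unique_vowels_alt
  simp only []
  set cs := sentence.toList with hcs
  have hA : (PySem.List.pyRange 1 (PySem.List.len cs - 1) 1).foldl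
      (pvStepA cs (PySem.List.len cs)) (PySem.Set.empty, false)
      = (pvBSet cs (PySem.List.len cs) (PySem.List.len cs - 1),
         pvPrev cs (PySem.List.len cs - 1)) := by
    rcases Nat.eq_zero_or_pos cs.length with h0 | hpos
    · rw [PySem.List.pyRange_one_eq_nil (by simp [PySem.List.len_eq, h0])]
      simp [pvBSet, pvPrev, PySem.List.pyRange_one_eq_nil, PySem.List.len_eq, h0,
        PySem.Set.ofList]
    · have heq : PySem.List.len cs - 1 = ((cs.length - 1 : Nat) : Int) := by
        simp only [PySem.List.len_eq]; omega
      rw [heq]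
      exact pvInv cs (cs.length - 1) (by simp only [PySem.List.len_eq]; omega)
  rw [hA]
  unfold pvBSet PySem.Set.len
  set L := ((PySem.List.pyRange 2 (PySem.List.len cs - 1) 1).filter
      (pvPick cs (PySem.List.len cs))).map (fun i => PySem.List.pyGetD cs i ' ') with hL
  have hsub : ∀ x ∈ L, x ∈ pvVowelsStr := by
    intro x hx
    rcases List.mem_map.mp hx with ⟨i, hi, hgi⟩
    rcases List.mem_filter.mp hi with ⟨_, hip⟩
    unfold pvPick at hip
    simp only [Bool.and_eq_true] at hip
    rw [← hgi]
    have h1 : pvVowelsStr.contains (PySem.List.pyGetD cs i ' ') = true := hip.1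
    simpa using h1
  rw [pvCard L hsub]
  have hmap : ∀ v ∈ pvVowelsStr,
      (if (PySem.List.pyRange 2 (PySem.List.len cs - 1) 1).any
            (fun i => (PySem.List.pyGetD cs i ' ' == v) && pvQualifies cs (PySem.List.len cs) i)
       then (1:Int) else 0) = (if decide (v ∈ L) then (1:Int) else 0) := by
    intro v hv
    rw [pvAnyIffMem cs v hv]
  rw [List.map_congr_left hmap]
  rw [PySem.List.sum_map_ite_one_zero]
  simp [List.countP_eq_length_filter]
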